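-- pv_equiv track=rewrite | github.com/u2d-ai/msaSDK | msaSDK/utils/doc_code_ref.py | format_pip_result
-- ===== SOURCE A (Python) =====
-- from typing import List
--
-- def format_pip_result(pip_result, version):
--     req_line_text: str = ""
--     check_version: str = ""
--     check_required: List[str] = []
--     for req_line in pip_result.splitlines():
--         if not req_line.__contains__("Location:"):
--             if req_line.__contains__("Version:") and not req_line.__contains__(version) and len(
--                     version) > 0:
--                 check_version = req_line
--             if req_line.__contains__("Requires:"):
--                 temp_req_line = req_line.replace("Requires:", "").strip()
--                 if len(temp_req_line) > 0:
--                     tl: List[str] = temp_req_line.split(", ")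
--                     if len(tl) > 0:
--                         check_required = tl.copy()
--
--             req_line_text += f"    {req_line}\n"  # keep the spaces !important
--
--     return req_line_text, check_version, check_required
-- ===== SOURCE B (Python) =====
-- def format_pip_result(pip_result, version):
--     kept = [l for l in pip_result.splitlines() if "Location:" not in l]
--     req_line_text = "".join(f"    {l}\n" for l in kept)
--     check_version = ""
--     for l in reversed(kept):
--         if "Version:" in l and version not in l and len(version) > 0:
--             check_version = l
--             break
--     check_required = []
--     for l in reversed(kept):
--         if "Requires:" in l:
--             rest = l.replace("Requires:", "").strip()
--             if rest:
--                 check_required = rest.split(", ")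
--                 break
--     return req_line_text, check_version, check_required
-- ===== Notes on version B (the rewrite author's own statement) =====
-- stated objective: simpler
-- what changed: Replaces A's single stateful fold that threads all three results through one loop with a filter of the kept lines followed by a join for the text and two independent backwards scans (first match from the end) for the version and requires lines.
import Mathlib
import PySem

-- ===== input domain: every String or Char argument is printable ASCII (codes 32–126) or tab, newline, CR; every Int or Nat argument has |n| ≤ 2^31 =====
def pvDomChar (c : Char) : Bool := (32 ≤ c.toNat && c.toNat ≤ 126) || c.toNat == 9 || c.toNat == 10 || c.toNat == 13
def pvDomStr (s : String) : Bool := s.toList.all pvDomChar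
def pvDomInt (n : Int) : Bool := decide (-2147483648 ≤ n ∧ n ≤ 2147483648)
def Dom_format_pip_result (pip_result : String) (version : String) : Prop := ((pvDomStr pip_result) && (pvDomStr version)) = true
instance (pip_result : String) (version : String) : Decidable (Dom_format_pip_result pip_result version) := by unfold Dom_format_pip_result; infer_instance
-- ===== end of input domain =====

-- B replaces A's single stateful loop by a filter + join for the text and two separate
-- backwards scans (first match from the end) for version/requires; objective: simpler.

-- shared helper: Python's s.split(sep) for a nonempty sep (both Pythons call str.split)
def strSplit (s sep : String) : List String := (PySem.Str.split? s sep).getD []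

-- ===== PORT A =====
def format_pip_result (pip_result : String) (version : String) : String × String × List String :=
  (PySem.Str.splitlines pip_result).foldl
    (fun (st : String × String × List String) req_line =>
      if !(PySem.Str.isIn "Location:" req_line) then
        let check_version :=
          if PySem.Str.isIn "Version:" req_line && !(PySem.Str.isIn version req_line)
              && decide (0 < PySem.Str.len version) then req_line else st.2.1
        let check_required :=
          if PySem.Str.isIn "Requires:" req_line then
            let temp_req_line := PySem.Str.strip (PySem.Str.replace req_line "Requires:" "")
            if 0 < PySem.Str.len temp_req_line then
              let tl := strSplit temp_req_line ", "
              if 0 < tl.length then tl else st.2.2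
            else st.2.2
          else st.2.2
        (st.1 ++ ("    " ++ req_line ++ "\n"), check_version, check_required)
      else st)
    ("", "", [])

-- ===== PORT B =====
def keptLines (pip_result : String) : List String :=
  (PySem.Str.splitlines pip_result).filter (fun l => !(PySem.Str.isIn "Location:" l))

def findVersion (version : String) : List String → String
  | [] => ""
  | l :: ls =>
    if PySem.Str.isIn "Version:" l && !(PySem.Str.isIn version l)
        && decide (0 < PySem.Str.len version) then l
    else findVersion version ls

def findRequires : List String → List String
  | [] => []
  | l :: ls =>
    if PySem.Str.isIn "Requires:" l then
      let rest := PySem.Str.strip (PySem.Str.replace l "Requires:" "")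
      if rest ≠ "" then strSplit rest ", " else findRequires ls
    else findRequires ls

def format_pip_result_alt (pip_result : String) (version : String) : String × String × List String :=
  let kept := keptLines pip_result
  (PySem.Str.join "" (kept.map (fun l => "    " ++ l ++ "\n")),
   findVersion version kept.reverse,
   findRequires kept.reverse)

-- ===== PRECONDITION & SPEC =====
def Spec_format_pip_result (pip_result : String) (version : String) (out : String × String × List String) : Prop := out = format_pip_result_alt pip_result version
instance (pip_result : String) (version : String) (out : String × String × List String) : Decidable (Spec_format_pip_result pip_result version out) := by unfold Spec_format_pip_result; infer_instance

-- ===== CLAIM (what is proved, stated in full; the proofs are below) =====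
def Claim_equal_format_pip_result : Prop := ∀ (pip_result : String) (version : String), Dom_format_pip_result pip_result version → Spec_format_pip_result pip_result version (format_pip_result pip_result version)

-- ===== LEMMAS AND PROOFS =====

theorem splitOn_go_ne_nil (sep : List Char) (fuel : Nat) :
    ∀ l cur acc, PySem.Chars.splitOn.go sep fuel l cur acc ≠ [] := by
  induction fuel with
  | zero => intro l cur acc; simp [PySem.Chars.splitOn.go]
  | succ n ih =>
    intro l cur acc
    cases l with
    | nil => simp [PySem.Chars.splitOn.go]
    | cons c rest =>
      rw [PySem.Chars.splitOn.go]
      split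
      · exact ih _ _ _
      · exact ih _ _ _

theorem strSplit_length_pos (s sep : String) (h : sep ≠ "") : 0 < (strSplit s sep).length := by
  have hsep : sep.toList.isEmpty = false := by
    simp [String.toList_eq_nil_iff, h]
  unfold strSplit PySem.Str.split?
  rw [PySem.Chars.split?, hsep]
  simp only [Bool.false_eq_true, if_false, Option.map_some, Option.getD_some, List.length_map]
  have := splitOn_go_ne_nil sep.toList (s.toList.length + 1) s.toList [] []
  rw [PySem.Chars.splitOn]
  exact List.length_pos_iff.mpr this

theorem len_pos_iff (s : String) : (0 < PySem.Str.len s) ↔ s ≠ "" := by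
  rw [PySem.Str.len_eq]
  constructor
  · intro h hs
    subst hs
    norm_num at h
  · intro h
    have h1 : s.toList ≠ [] := fun e => h (String.toList_eq_nil_iff.mp e)
    exact_mod_cast List.length_pos_iff.mpr h1

theorem foldl_prod3 {α β γ δ : Type} (f1 : α → δ → α) (f2 : β → δ → β) (f3 : γ → δ → γ) :
    ∀ (l : List δ) (a : α) (b : β) (c : γ),
      l.foldl (fun st x => (f1 st.1 x, f2 st.2.1 x, f3 st.2.2 x)) (a, b, c)
        = (l.foldl f1 a, l.foldl f2 b, l.foldl f3 c) := by
  intro l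
  induction l with
  | nil => intro a b c; rfl
  | cons x xs ih => intro a b c; simpa using ih (f1 a x) (f2 b x) (f3 c x)

theorem flatten_intersperse_nil {α : Type} : ∀ (l : List (List α)), (List.intersperse [] l).flatten = l.flatten
  | [] => rfl
  | [a] => by simp
  | a :: b :: t => by
    rw [show List.intersperse ([] : List α) (a :: b :: t) = a :: [] :: List.intersperse [] (b :: t) from rfl]
    simp only [List.flatten_cons, flatten_intersperse_nil (b :: t)]
    simp

theorem join_empty_cons (x : String) (xs : List String) :
    PySem.Str.join "" (x :: xs) = x ++ PySem.Str.join "" xs := by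
  apply String.toList_inj.mp
  simp [PySem.Str.toList_join, PySem.Chars.join, List.intercalate, flatten_intersperse_nil]

theorem join_empty_nil : PySem.Str.join "" ([] : List String) = "" := by
  apply String.toList_inj.mp
  simp [PySem.Str.toList_join, PySem.Chars.join, List.intercalate]

theorem foldl_append_join (g : String → String) :
    ∀ (l : List String) (init : String),
      l.foldl (fun a x => a ++ g x) init = init ++ PySem.Str.join "" (l.map g)
  | [], init => by simp [join_empty_nil]
  | x :: xs, init => by
    simp only [List.foldl_cons, List.map_cons, join_empty_cons, foldl_append_join g xs (init ++ g x)]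
    rw [String.append_assoc]

theorem foldl_if_eq_reverse_find {α : Type} (p : String → Bool) (v : String → α) :
    ∀ (l : List String) (acc : α),
      l.foldl (fun a x => if p x then v x else a) acc
        = (match l.reverse.find? p with | some x => v x | none => acc) := by
  intro l
  induction l with
  | nil => intro acc; rfl
  | cons x xs ih =>
    intro acc
    simp only [List.foldl_cons, List.reverse_cons, List.find?_append, ih]
    cases h : xs.reverse.find? p with
    | some y => simp [Option.or]
    | none =>
      simp only [Option.none_or]
      by_cases hp : p x <;> simp [List.find?, hp]

theorem findVersion_eq_find (version : String) (r : List String) :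
    findVersion version r
      = (match r.find? (fun x => PySem.Str.isIn "Version:" x && !(PySem.Str.isIn version x)
            && decide (0 < PySem.Str.len version)) with
         | some x => x | none => "") := by
  induction r with
  | nil => rfl
  | cons l ls ih =>
    rw [findVersion, List.find?_cons]
    cases hb : (PySem.Str.isIn "Version:" l && !(PySem.Str.isIn version l)
        && decide (0 < PySem.Str.len version)) with
    | true => rw [if_pos rfl]
    | false => rw [if_neg (by exact fun h => Bool.false_ne_true h), ih]

theorem findRequires_eq_find (r : List String) :
    findRequires r
      = (match r.find? (fun x => PySem.Str.isIn "Requires:" x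
            && decide (0 < PySem.Str.len (PySem.Str.strip (PySem.Str.replace x "Requires:" "")))) with
         | some x => strSplit (PySem.Str.strip (PySem.Str.replace x "Requires:" "")) ", "
         | none => []) := by
  induction r with
  | nil => rfl
  | cons l ls ih =>
    rw [findRequires, List.find?_cons]
    cases hb : (PySem.Str.isIn "Requires:" l
        && decide (0 < PySem.Str.len (PySem.Str.strip (PySem.Str.replace l "Requires:" "")))) with
    | true =>
      obtain ⟨h1, h2⟩ := Bool.and_eq_true_iff.mp hb
      rw [if_pos h1, if_pos ((len_pos_iff _).mp (of_decide_eq_true h2))]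
    | false =>
      rcases Bool.and_eq_false_iff.mp hb with h1 | h2
      · rw [if_neg (by rw [h1]; exact fun h => Bool.false_ne_true h), ih]
      · by_cases h1 : PySem.Str.isIn "Requires:" l = true
        · have hs : PySem.Str.strip (PySem.Str.replace l "Requires:" "") = "" := by
            by_contra hne
            exact Bool.false_ne_true (h2 ▸ decide_eq_true ((len_pos_iff _).mpr hne))
          rw [if_pos h1, if_neg (fun hn => hn hs), ih]
        · rw [if_neg h1, ih]

theorem stepR_eq :
    (fun (a : List String) (x : String) =>
      if PySem.Str.isIn "Requires:" x then
        let temp_req_line := PySem.Str.strip (PySem.Str.replace x "Requires:" "")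
        if 0 < PySem.Str.len temp_req_line then
          let tl := strSplit temp_req_line ", "
          if 0 < tl.length then tl else a
        else a
      else a)
    = (fun (a : List String) (x : String) =>
      if PySem.Str.isIn "Requires:" x
          && decide (0 < PySem.Str.len (PySem.Str.strip (PySem.Str.replace x "Requires:" ""))) then
        strSplit (PySem.Str.strip (PySem.Str.replace x "Requires:" "")) ", "
      else a) := by
  funext a x
  by_cases h1 : PySem.Str.isIn "Requires:" x = true
  · by_cases h2 : 0 < PySem.Str.len (PySem.Str.strip (PySem.Str.replace x "Requires:" ""))
    · have hc : (PySem.Str.isIn "Requires:" x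
          && decide (0 < PySem.Str.len (PySem.Str.strip (PySem.Str.replace x "Requires:" "")))) = true := by
        rw [h1, decide_eq_true h2]; rfl
      rw [if_pos h1, if_pos h2, if_pos (strSplit_length_pos _ ", " (by decide)), if_pos hc]
    · have hc : (PySem.Str.isIn "Requires:" x
          && decide (0 < PySem.Str.len (PySem.Str.strip (PySem.Str.replace x "Requires:" "")))) = false := by
        rw [h1, decide_eq_false h2]; rfl
      rw [if_pos h1, if_neg h2, if_neg (fun h => Bool.false_ne_true (hc ▸ h))]
  · have hc : (PySem.Str.isIn "Requires:" x
        && decide (0 < PySem.Str.len (PySem.Str.strip (PySem.Str.replace x "Requires:" "")))) = false := by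
      rw [Bool.eq_false_iff.mpr h1]; rfl
    rw [if_neg h1, if_neg (fun h => Bool.false_ne_true (hc ▸ h))]

theorem empty_append_str (s : String) : "" ++ s = s := by
  apply String.toList_inj.mp
  simp

-- ===== VERDICT (by name: the statement is the Claim_ definition above) =====
theorem format_pip_result_spec : Claim_equal_format_pip_result := by
  intro pip_result version _hdom
  unfold Spec_format_pip_result format_pip_result format_pip_result_alt keptLines
  have h0 : (PySem.Str.splitlines pip_result).foldl
      (fun (st : String × String × List String) req_line =>
        if !(PySem.Str.isIn "Location:" req_line) then
          let check_version :=
            if PySem.Str.isIn "Version:" req_line && !(PySem.Str.isIn version req_line)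
                && decide (0 < PySem.Str.len version) then req_line else st.2.1
          let check_required :=
            if PySem.Str.isIn "Requires:" req_line then
              let temp_req_line := PySem.Str.strip (PySem.Str.replace req_line "Requires:" "")
              if 0 < PySem.Str.len temp_req_line then
                let tl := strSplit temp_req_line ", "
                if 0 < tl.length then tl else st.2.2
              else st.2.2
            else st.2.2
          (st.1 ++ ("    " ++ req_line ++ "\n"), check_version, check_required)
        else st)
      ("", "", [])
      = ((PySem.Str.splitlines pip_result).filter (fun l => !(PySem.Str.isIn "Location:" l))).foldl
          (fun (st : String × String × List String) x =>
            ((fun a x => a ++ ("    " ++ x ++ "\n")) st.1 x,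
             (fun a x => if PySem.Str.isIn "Version:" x && !(PySem.Str.isIn version x)
                 && decide (0 < PySem.Str.len version) then x else a) st.2.1 x,
             (fun a x =>
               if PySem.Str.isIn "Requires:" x then
                 let temp_req_line := PySem.Str.strip (PySem.Str.replace x "Requires:" "")
                 if 0 < PySem.Str.len temp_req_line then
                   let tl := strSplit temp_req_line ", "
                   if 0 < tl.length then tl else a
                 else a
               else a) st.2.2 x))
          ("", "", []) := by
    rw [List.foldl_filter]
  have h1 := foldl_prod3
    (fun (a : String) (x : String) => a ++ ("    " ++ x ++ "\n"))
    (fun (a : String) (x : String) => if PySem.Str.isIn "Version:" x && !(PySem.Str.isIn version x)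
        && decide (0 < PySem.Str.len version) then x else a)
    (fun (a : List String) (x : String) =>
      if PySem.Str.isIn "Requires:" x then
        let temp_req_line := PySem.Str.strip (PySem.Str.replace x "Requires:" "")
        if 0 < PySem.Str.len temp_req_line then
          let tl := strSplit temp_req_line ", "
          if 0 < tl.length then tl else a
        else a
      else a)
    ((PySem.Str.splitlines pip_result).filter (fun l => !(PySem.Str.isIn "Location:" l)))
    "" "" []
  rw [h0, h1, stepR_eq, foldl_append_join, foldl_if_eq_reverse_find, foldl_if_eq_reverse_find,
      ← findVersion_eq_find, ← findRequires_eq_find, empty_append_str]
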